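-- pv_equiv track=rewrite | github.com/CodeTest-StudyGroup/Code-Test-Study | JJangSungWon/[2]KAKAO/[2018_BLIND]_프렌즈4블록.py | find
-- ===== SOURCE A (Python) =====
-- def find(m, n, array):  # 4개 일치하는 블록 찾기
--     flag = False
--     temp = [[False] * n for _ in range(m)]
--     for i in range(m - 1):
--         for j in range(n - 1):
--             if array[i][j] != "":
--                 if array[i][j] == array[i][j + 1] == array[i + 1][j] == array[i + 1][j + 1]:
--                     temp[i][j], temp[i][j + 1], temp[i + 1][j], temp[i + 1][j + 1] = True, True, True, True
--                     flag = True
--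
--     return temp, flag
-- ===== SOURCE B (Python) =====
-- def find(m, n, array):
--     # Per-cell "pull" formulation: instead of mutating a grid while scanning,
--     # each output cell asks whether any of the (up to four) 2x2 blocks that
--     # contain it has four equal non-empty labels; no mutation, no second pass.
--     def origin(i, j):
--         if not (0 <= i < m - 1 and 0 <= j < n - 1):
--             return False
--         v = array[i][j]
--         return v != "" and v == array[i][j + 1] == array[i + 1][j] == array[i + 1][j + 1]
--
--     temp = [[origin(i - 1, j - 1) or origin(i - 1, j) or origin(i, j - 1) or origin(i, j)
--              for j in range(n)] for i in range(m)]
--     flag = any(origin(i, j) for i in range(m - 1) for j in range(n - 1))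
--     return temp, flag
-- ===== Notes on version B (the rewrite author's own statement) =====
-- stated objective: alternative
-- what changed: A scans block origins and mutates a shared boolean grid in place as it goes; B is a pure per-cell formulation: every output cell independently asks whether any of the up-to-four 2x2 blocks containing it matches, and the flag is an any() over origins, with no mutation and no marking pass.
import Mathlib
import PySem

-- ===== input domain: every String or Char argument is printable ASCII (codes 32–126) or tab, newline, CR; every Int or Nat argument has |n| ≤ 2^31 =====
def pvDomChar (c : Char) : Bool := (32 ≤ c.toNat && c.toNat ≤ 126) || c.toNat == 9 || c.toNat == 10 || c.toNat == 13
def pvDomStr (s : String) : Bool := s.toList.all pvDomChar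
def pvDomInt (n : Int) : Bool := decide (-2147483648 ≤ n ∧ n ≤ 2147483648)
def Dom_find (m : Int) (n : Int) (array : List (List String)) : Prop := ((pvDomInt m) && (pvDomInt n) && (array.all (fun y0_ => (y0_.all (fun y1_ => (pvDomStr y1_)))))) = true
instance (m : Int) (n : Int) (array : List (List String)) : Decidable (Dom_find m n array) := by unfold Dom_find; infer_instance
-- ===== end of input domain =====

-- B replaces A's scan-and-mutate marking by a per-cell pull: each output cell is computed
-- independently as "some 2x2 block containing this cell matches"; alternative decomposition, same cost.

-- shared indexing helpers (both Pythons index array identically)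
def pvCell? (array : List (List String)) (i j : Int) : Option String :=
  (PySem.List.pyGet? array i).bind (fun r => PySem.List.pyGet? r j)

-- array[i][j]; the "" default is only reached outside Pre_find (where Python raises IndexError)
def pvCellD (array : List (List String)) (i j : Int) : String :=
  (pvCell? array i j).getD ""

-- the chained comparison array[i][j] == array[i][j+1] == array[i+1][j] == array[i+1][j+1]
def pvChain (array : List (List String)) (i j : Int) : Bool :=
  (pvCellD array i j == pvCellD array i (j + 1)) &&
  (pvCellD array i (j + 1) == pvCellD array (i + 1) j) &&
  (pvCellD array (i + 1) j == pvCellD array (i + 1) (j + 1))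

-- ===== PORT A =====
-- temp[i][j] = True  (indices produced by A's loops are always in range of temp)
def pvSet (t : List (List Bool)) (i j : Int) : List (List Bool) :=
  t.modify i.toNat (fun row => row.set j.toNat true)

-- the simultaneous assignment temp[i][j], temp[i][j+1], temp[i+1][j], temp[i+1][j+1] = True,…
def pvMark4 (t : List (List Bool)) (i j : Int) : List (List Bool) :=
  pvSet (pvSet (pvSet (pvSet t i j) i (j + 1)) (i + 1) j) (i + 1) (j + 1)

def find (m : Int) (n : Int) (array : List (List String)) : List (List Bool) × Bool :=
  let temp := (List.range m.toNat).map (fun _ => List.replicate n.toNat false)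
  (PySem.List.pyRange 0 (m - 1) 1).foldl (fun st i =>
    (PySem.List.pyRange 0 (n - 1) 1).foldl (fun st j =>
      if pvCellD array i j != "" then
        if pvChain array i j then (pvMark4 st.1 i j, true) else st
      else st) st) (temp, false)

-- ===== PORT B =====
-- Source B's origin(i, j): bounds test, then v != "" and the chained equality
def pvOrigin (m : Int) (n : Int) (array : List (List String)) (i j : Int) : Bool :=
  if 0 ≤ i ∧ i < m - 1 ∧ 0 ≤ j ∧ j < n - 1 then
    (pvCellD array i j != "") && pvChain array i j
  else false

def find_alt (m : Int) (n : Int) (array : List (List String)) : List (List Bool) × Bool :=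
  let temp := (PySem.List.pyRange 0 m 1).map (fun i =>
    (PySem.List.pyRange 0 n 1).map (fun j =>
      pvOrigin m n array (i - 1) (j - 1) || pvOrigin m n array (i - 1) j ||
      pvOrigin m n array i (j - 1) || pvOrigin m n array i j))
  let flag := (PySem.List.pyRange 0 (m - 1) 1).any (fun i =>
    (PySem.List.pyRange 0 (n - 1) 1).any (fun j => pvOrigin m n array i j))
  (temp, flag)

-- ===== PRECONDITION & SPEC =====
-- Pre_find holds exactly when no array access of A raises IndexError: for every loop cell (i,j),
-- array[i][j] exists, and each further cell of the 2x2 block exists whenever Python's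
-- short-circuiting actually reads it.
def pvNoRaiseAt (array : List (List String)) (i j : Int) : Bool :=
  match pvCell? array i j with
  | none => false
  | some a => a == "" ||
    match pvCell? array i (j + 1) with
    | none => false
    | some b => a != b ||
      match pvCell? array (i + 1) j with
      | none => false
      | some c => b != c || (pvCell? array (i + 1) (j + 1)).isSome

-- Bool form, with all iteration bounded by the array's own dimensions so it evaluates fast
def pvPreB (m : Int) (n : Int) (array : List (List String)) : Bool :=
  decide (m ≤ 1) || decide (n ≤ 1) ||
  (decide (m - 1 ≤ (array.length : Int)) &&
    (List.range (m - 1).toNat).all (fun i =>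
      match array[i]? with
      | none => false
      | some row =>
        decide (n - 1 ≤ (row.length : Int)) &&
          (List.range (n - 1).toNat).all (fun j => pvNoRaiseAt array (i : Int) (j : Int))))

def Pre_find (m : Int) (n : Int) (array : List (List String)) : Prop := pvPreB m n array = true

instance (m : Int) (n : Int) (array : List (List String)) : Decidable (Pre_find m n array) := by
  unfold Pre_find; infer_instance

def pvWitness_find : Int × Int × List (List String) := (2, 2, [["a", "a"], ["a", "a"]])

def Spec_find (m : Int) (n : Int) (array : List (List String)) (out : List (List Bool) × Bool) : Prop := out = find_alt m n array
instance (m : Int) (n : Int) (array : List (List String)) (out : List (List Bool) × Bool) : Decidable (Spec_find m n array out) := by unfold Spec_find; infer_instance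

-- ===== CLAIM (what is proved, stated in full; the proofs are below) =====
def Claim_equal_find : Prop := ∀ (m : Int) (n : Int) (array : List (List String)), Dom_find m n array → Pre_find m n array → Spec_find m n array (find m n array)

-- ===== LEMMAS AND PROOFS =====

-- the condition A tests at an origin (i, j), and the origin list A's loops traverse
def pvCond (array : List (List String)) (i j : Int) : Bool :=
  (pvCellD array i j != "") && pvChain array i j

def pvPS (m : Int) (n : Int) (array : List (List String)) : List (Int × Int) :=
  (PySem.List.pyRange 0 (m - 1) 1).flatMap (fun i =>
    ((PySem.List.pyRange 0 (n - 1) 1).filter (fun j => pvCond array i j)).map (fun j => (i, j)))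

-- one cell of a grid, Option-valued
def pvGCell (t : List (List Bool)) (i j : Nat) : Option Bool :=
  t[i]?.bind (fun r => r[j]?)

-- does the 2x2 mark with origin (a, b) touch cell (i, j)?
def pvCovers (a b : Int) (i j : Nat) : Bool :=
  (a.toNat == i && b.toNat == j) || (a.toNat == i && (b + 1).toNat == j) ||
  ((a + 1).toNat == i && b.toNat == j) || ((a + 1).toNat == i && (b + 1).toNat == j)

theorem pv_isEmpty_append {α : Type} (l1 l2 : List α) :
    (l1 ++ l2).isEmpty = (l1.isEmpty && l2.isEmpty) := by
  cases l1 <;> simp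

-- A's inner loop, generically: detect-and-mark in one pass equals marking the filtered list.
theorem pv_inner {α : Type} (c1 c2 : Int → Bool) (f : Int → α → α) (L : List Int) :
    ∀ (t : α) (b : Bool),
      L.foldl (fun st j => if c1 j then (if c2 j then (f j st.1, true) else st) else st) (t, b)
      = ((L.filter (fun j => c1 j && c2 j)).foldl (fun t j => f j t) t,
         b || !((L.filter (fun j => c1 j && c2 j)).isEmpty)) := by
  induction L with
  | nil => intro t b; simp
  | cons j L ih =>
    intro t b
    by_cases h1 : c1 j = true <;> by_cases h2 : c2 j = true <;>
      simp [h1, h2, ih]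

-- A's nested loops equal marking the flatMap of filtered rows, with the flag as non-emptiness.
theorem pv_outer {α : Type} (c1 c2 : Int → Int → Bool) (f : Int → Int → α → α) (L2 : List Int) :
    ∀ (L1 : List Int) (t : α) (b : Bool),
      L1.foldl (fun st i =>
          L2.foldl (fun st j => if c1 i j then (if c2 i j then (f i j st.1, true) else st) else st) st) (t, b)
      = ((L1.flatMap (fun i => (L2.filter (fun j => c1 i j && c2 i j)).map (fun j => (i, j)))).foldl
           (fun t p => f p.1 p.2 t) t,
         b || !((L1.flatMap (fun i => (L2.filter (fun j => c1 i j && c2 i j)).map (fun j => (i, j)))).isEmpty)) := by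
  intro L1
  induction L1 with
  | nil => intro t b; simp
  | cons i L1 ih =>
    intro t b
    simp only [List.foldl_cons, pv_inner (c1 i) (c2 i) (f i) L2 t b, ih, List.flatMap_cons,
      List.foldl_append, List.foldl_map, pv_isEmpty_append, List.isEmpty_map,
      Bool.not_and, Bool.or_assoc]

-- marking one cell, seen cell-wise
theorem pv_cell_set (t : List (List Bool)) (a b : Int) (i j : Nat) :
    pvGCell (pvSet t a b) i j
      = (pvGCell t i j).map (fun x => x || (a.toNat == i && b.toNat == j)) := by
  unfold pvGCell pvSet
  rw [List.getElem?_modify]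
  cases h : t[i]? with
  | none => by_cases ha : a.toNat = i <;> simp [ha]
  | some r =>
    by_cases ha : a.toNat = i
    · simp only [ha, if_true, Option.map_eq_map, Option.map_some, Option.bind_some]
      rw [List.getElem?_set]
      by_cases hb : b.toNat = j
      · by_cases hl : j < r.length
        · simp only [hb, hl, if_true]
          cases h2 : r[j]? with
          | none => rw [List.getElem?_eq_none_iff] at h2; omega
          | some x => simp
        · have h2 : r[j]? = none := by rw [List.getElem?_eq_none_iff]; omega
          simp [hb, hl]
      · have hb' : (b.toNat == j) = false := by simp [hb]
        simp [hb, hb']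
    · have ha' : (a.toNat == i) = false := by simp [ha]
      simp [ha, ha']

-- marking a 2x2 block, seen cell-wise
theorem pv_cell_mark4 (t : List (List Bool)) (a b : Int) (i j : Nat) :
    pvGCell (pvMark4 t a b) i j
      = (pvGCell t i j).map (fun x => x || pvCovers a b i j) := by
  unfold pvMark4 pvCovers
  simp only [pv_cell_set, Option.map_map]
  cases h : pvGCell t i j <;> simp [Function.comp_def, Bool.or_assoc]

-- the whole marking pass, seen cell-wise
theorem pv_cell_foldl (ps : List (Int × Int)) (i j : Nat) :
    ∀ t, pvGCell (ps.foldl (fun t p => pvMark4 t p.1 p.2) t) i j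
      = (pvGCell t i j).map (fun x => x || ps.any (fun p => pvCovers p.1 p.2 i j)) := by
  induction ps with
  | nil => intro t; cases h : pvGCell t i j <;> simp [h]
  | cons p ps ih =>
    intro t
    simp only [List.foldl_cons, ih, pv_cell_mark4, Option.map_map, List.any_cons]
    cases h : pvGCell t i j <;> simp [Function.comp_def, Bool.or_assoc]

-- the marking pass never changes the number of rows
theorem pv_len_foldl (ps : List (Int × Int)) :
    ∀ t : List (List Bool), (ps.foldl (fun t p => pvMark4 t p.1 p.2) t).length = t.length := by
  induction ps with
  | nil => intro t; rfl
  | cons p ps ih => intro t; rw [List.foldl_cons, ih]; simp [pvMark4, pvSet]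

theorem pyRange_zero_map (m : Int) :
    PySem.List.pyRange 0 m 1 = (List.range m.toNat).map Int.ofNat := by
  rw [PySem.List.pyRange_one, show m - 0 = m by ring]
  exact List.map_congr_left (fun a _ => by simp)

-- a cell of the all-False grid
theorem pv_gcell_zero (M N i j : Nat) :
    pvGCell ((List.range M).map (fun _ => List.replicate N false)) i j
      = if i < M ∧ j < N then some false else none := by
  unfold pvGCell
  by_cases hi : i < M
  · rw [List.getElem?_eq_getElem (by simpa using hi)]
    simp only [List.getElem_map, Option.bind_some]
    by_cases hj : j < N
    · rw [List.getElem?_eq_getElem (by simpa using hj)]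
      simp [hi, hj]
    · have h2 : (List.replicate N false)[j]? = none := by
        rw [List.getElem?_eq_none_iff]; simpa using Nat.le_of_not_lt hj
      simp [hi, hj]
  · have h2 : ((List.range M).map (fun _ => List.replicate N false))[i]? = none := by
      rw [List.getElem?_eq_none_iff]; simpa using Nat.le_of_not_lt hi
    simp [hi]

-- when Source B's origin is True, as a proposition
theorem pv_origin_iff (m n : Int) (array : List (List String)) (x y : Int) :
    pvOrigin m n array x y = true
      ↔ 0 ≤ x ∧ x < m - 1 ∧ 0 ≤ y ∧ y < n - 1 ∧ pvCond array x y = true := by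
  unfold pvOrigin pvCond
  split_ifs with h
  · tauto
  · simp; tauto

-- the crux: "some collected origin covers cell (i, j)" is "some block containing (i, j) matches"
theorem pv_crux (m n : Int) (array : List (List String)) (i j : Nat) :
    (pvPS m n array).any (fun p => pvCovers p.1 p.2 i j)
      = (pvOrigin m n array ((i : Int) - 1) ((j : Int) - 1) ||
         pvOrigin m n array ((i : Int) - 1) (j : Int) ||
         pvOrigin m n array (i : Int) ((j : Int) - 1) ||
         pvOrigin m n array (i : Int) (j : Int)) := by
  rw [Bool.eq_iff_iff]
  simp only [List.any_eq_true, Bool.or_eq_true, pv_origin_iff, pvPS, List.mem_flatMap,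
    List.mem_map, List.mem_filter, PySem.List.mem_pyRange_one, pvCovers, Bool.and_eq_true,
    beq_iff_eq]
  constructor
  · rintro ⟨p, ⟨a, ⟨h0a, ham⟩, b, ⟨⟨h0b, hbn⟩, hc⟩, rfl⟩, hcov⟩
    rcases hcov with (((⟨h1, h2⟩ | ⟨h1, h2⟩) | ⟨h1, h2⟩) | ⟨h1, h2⟩)
    · refine Or.inr ?_
      have ea : a = (i : Int) := by omega
      have eb : b = (j : Int) := by omega
      subst ea; subst eb
      exact ⟨h0a, ham, h0b, hbn, hc⟩
    · refine Or.inl (Or.inr ?_)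
      have ea : a = (i : Int) := by omega
      have eb : b = (j : Int) - 1 := by omega
      subst ea; subst eb
      exact ⟨h0a, ham, h0b, hbn, hc⟩
    · refine Or.inl (Or.inl (Or.inr ?_))
      have ea : a = (i : Int) - 1 := by omega
      have eb : b = (j : Int) := by omega
      subst ea; subst eb
      exact ⟨h0a, ham, h0b, hbn, hc⟩
    · refine Or.inl (Or.inl (Or.inl ?_))
      have ea : a = (i : Int) - 1 := by omega
      have eb : b = (j : Int) - 1 := by omega
      subst ea; subst eb
      exact ⟨h0a, ham, h0b, hbn, hc⟩
  · rintro (((⟨h0a, ham, h0b, hbn, hc⟩ | ⟨h0a, ham, h0b, hbn, hc⟩) |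
        ⟨h0a, ham, h0b, hbn, hc⟩) | ⟨h0a, ham, h0b, hbn, hc⟩)
    · exact ⟨((i : Int) - 1, (j : Int) - 1), ⟨_, ⟨h0a, ham⟩, _, ⟨⟨h0b, hbn⟩, hc⟩, rfl⟩,
        Or.inr ⟨by omega, by omega⟩⟩
    · exact ⟨((i : Int) - 1, (j : Int)), ⟨_, ⟨h0a, ham⟩, _, ⟨⟨h0b, hbn⟩, hc⟩, rfl⟩,
        Or.inl (Or.inr ⟨by omega, by omega⟩)⟩
    · exact ⟨((i : Int), (j : Int) - 1), ⟨_, ⟨h0a, ham⟩, _, ⟨⟨h0b, hbn⟩, hc⟩, rfl⟩,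
        Or.inl (Or.inl (Or.inr ⟨by omega, by omega⟩))⟩
    · exact ⟨((i : Int), (j : Int)), ⟨_, ⟨h0a, ham⟩, _, ⟨⟨h0b, hbn⟩, hc⟩, rfl⟩,
        Or.inl (Or.inl (Or.inl ⟨by omega, by omega⟩))⟩

-- grid equality: A's mutated grid equals B's per-cell grid
theorem pv_grid (m n : Int) (array : List (List String)) :
    (pvPS m n array).foldl (fun t p => pvMark4 t p.1 p.2)
        ((List.range m.toNat).map (fun _ => List.replicate n.toNat false))
      = (PySem.List.pyRange 0 m 1).map (fun i =>
          (PySem.List.pyRange 0 n 1).map (fun j =>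
            pvOrigin m n array (i - 1) (j - 1) || pvOrigin m n array (i - 1) j ||
            pvOrigin m n array i (j - 1) || pvOrigin m n array i j)) := by
  rw [pyRange_zero_map m, pyRange_zero_map n]
  apply List.ext_getElem?
  intro i
  by_cases hi : i < m.toNat
  · obtain ⟨rA, hrA⟩ : ∃ rA, (List.foldl (fun t p => pvMark4 t p.1 p.2)
        ((List.range m.toNat).map (fun _ => List.replicate n.toNat false)) (pvPS m n array))[i]? = some rA :=
      ⟨_, List.getElem?_eq_getElem (by rw [pv_len_foldl]; simpa using hi)⟩
    rw [hrA, List.getElem?_map, List.getElem?_map, List.getElem?_range hi, Option.map_some, Option.map_some]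
    congr 1
    apply List.ext_getElem?
    intro j
    have hcell : pvGCell (List.foldl (fun t p => pvMark4 t p.1 p.2)
        ((List.range m.toNat).map (fun _ => List.replicate n.toNat false)) (pvPS m n array)) i j = rA[j]? := by
      unfold pvGCell; rw [hrA, Option.bind_some]
    rw [pv_cell_foldl, pv_gcell_zero] at hcell
    rw [List.getElem?_map, List.getElem?_map]
    by_cases hj : j < n.toNat
    · rw [if_pos ⟨hi, hj⟩] at hcell
      simp only [Option.map_some, Bool.false_or] at hcell
      rw [← hcell, List.getElem?_range hj, Option.map_some, Option.map_some, pv_crux]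
      norm_num
    · rw [if_neg (by tauto)] at hcell
      rw [Option.map_none] at hcell
      rw [← hcell, List.getElem?_eq_none_iff.mpr (by simpa using Nat.le_of_not_lt hj), Option.map_none, Option.map_none]
  · rw [List.getElem?_eq_none_iff.mpr, List.getElem?_eq_none_iff.mpr]
    · simp; omega
    · rw [pv_len_foldl]; simp; omega

theorem pv_any_true {α : Type} (l : List α) : l.any (fun _ => true) = !l.isEmpty := by
  cases l <;> simp

-- flag equality: "some origin was collected" is B's any-of-origins
theorem pv_flag (m n : Int) (array : List (List String)) :
    (!(pvPS m n array).isEmpty)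
      = (PySem.List.pyRange 0 (m - 1) 1).any (fun i =>
          (PySem.List.pyRange 0 (n - 1) 1).any (fun j => pvOrigin m n array i j)) := by
  rw [← pv_any_true, pvPS, List.any_flatMap]
  refine PySem.List.any_congr_mem (fun i hi => ?_)
  rw [List.any_map, List.any_filter]
  refine PySem.List.any_congr_mem (fun j hj => ?_)
  rw [PySem.List.mem_pyRange_one] at hi hj
  rw [pvOrigin, if_pos ⟨hi.1, hi.2, hj.1, hj.2⟩, pvCond]; simp

-- ===== VERDICT (by name: the statement is the Claim_ definition above) =====
theorem find_spec : Claim_equal_find := by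
  intro m n array _ _
  simp only [Spec_find, find, find_alt]
  rw [pv_outer (fun i j => pvCellD array i j != "") (fun i j => pvChain array i j)
    (fun i j t => pvMark4 t i j)
    (PySem.List.pyRange 0 (n - 1) 1) (PySem.List.pyRange 0 (m - 1) 1)
    ((List.range m.toNat).map (fun _ => List.replicate n.toNat false)) false]
  rw [Prod.mk.injEq]
  exact ⟨pv_grid m n array, by rw [Bool.false_or]; exact pv_flag m n array⟩
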